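-- pv_equiv track=rewrite | github.com/z117122/cloud-gpu-checker | cloud_status_core.py | summarize_process_lines
-- ===== SOURCE A (Python) =====
-- from typing import Any
--
-- def summarize_process_lines(raw: str) -> list[str]:
--     summary: dict[str, dict[str, Any]] = {}
--     for line in raw.splitlines():
--         line = line.strip()
--         if not line:
--             continue
--         parts = line.split(maxsplit=4)
--         if len(parts) < 5:
--             continue
--         pid, etime, pcpu, pmem, args = parts
--         entry = summary.setdefault(
--             args,
--             {
--                 "count": 0,
--                 "pid": pid,
--                 "etime": etime,
--                 "pcpu": pcpu,
--                 "pmem": pmem,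
--                 "args": args,
--             },
--         )
--         entry["count"] += 1
--
--     lines = []
--     for entry in summary.values():
--         prefix = f"{entry['count']}x" if entry["count"] > 1 else "1x"
--         lines.append(
--             f"{prefix} | pid {entry['pid']} | etime {entry['etime']} | cpu {entry['pcpu']}% | mem {entry['pmem']}% | {entry['args']}"
--         )
--     return lines
-- ===== SOURCE B (Python) =====
-- def summarize_process_lines(raw: str) -> list[str]:
--     def _parse(line):
--         line = line.strip()
--         if not line:
--             return None
--         parts = line.split(maxsplit=4)
--         if len(parts) < 5:
--             return None
--         return parts
--
--     lines = raw.splitlines()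
--
--     # pass 1: total occurrence count per args key over all valid lines
--     counts = {}
--     for line in lines:
--         rec = _parse(line)
--         if rec is not None:
--             counts[rec[4]] = counts.get(rec[4], 0) + 1
--
--     # pass 2: emit one line per key at its first appearance, using that record's fields
--     out = []
--     seen = set()
--     for line in lines:
--         rec = _parse(line)
--         if rec is None:
--             continue
--         pid, etime, pcpu, pmem, args = rec
--         if args in seen:
--             continue
--         seen.add(args)
--         n = counts[args]
--         prefix = f"{n}x" if n > 1 else "1x"
--         out.append(f"{prefix} | pid {pid} | etime {etime} | cpu {pcpu}% | mem {pmem}% | {args}")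
--     return out
-- ===== Notes on version B (the rewrite author's own statement) =====
-- stated objective: alternative
-- what changed: A builds one dict of mutable per-key records (count plus first-seen fields) in a single pass and then formats its values; B makes two passes: first a plain count table keyed by args, then a second scan with a seen-set that formats and emits a line at each key's first appearance.
import Mathlib
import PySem

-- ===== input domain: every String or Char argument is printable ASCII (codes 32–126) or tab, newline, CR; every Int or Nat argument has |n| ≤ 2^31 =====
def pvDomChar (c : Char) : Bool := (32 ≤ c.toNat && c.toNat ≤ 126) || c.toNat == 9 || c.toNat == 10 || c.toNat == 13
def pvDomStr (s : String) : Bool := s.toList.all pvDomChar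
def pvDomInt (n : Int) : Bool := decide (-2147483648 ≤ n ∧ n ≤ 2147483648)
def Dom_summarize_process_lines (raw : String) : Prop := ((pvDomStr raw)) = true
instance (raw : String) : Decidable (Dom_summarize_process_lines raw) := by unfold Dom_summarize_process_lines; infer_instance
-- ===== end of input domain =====

-- B replaces A's single pass over a dict of mutable records by two passes (count table, then
-- first-appearance emission with a seen-set); same output, no speed claim (objective: alternative).

-- ===== PORT A =====
-- one entry per args key: (count, pid, etime, pcpu, pmem, args), as in A's per-key dict
def pvStepA (d : PySem.Dict String (Int × String × String × String × String × String))
    (line : String) : PySem.Dict String (Int × String × String × String × String × String) :=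
  let line := PySem.Str.strip line
  if line = "" then d
  else
    match PySem.Str.split₀Max line 4 with
    | [pid, etime, pcpu, pmem, args] =>
        -- setdefault(args, {count: 0, …}) then entry["count"] += 1
        match d.get? args with
        | some entry => d.insert args (entry.1 + 1, entry.2)
        | none => d.insert args (0 + 1, pid, etime, pcpu, pmem, args)
    | _ => d  -- len(parts) < 5: skip

def pvFmtEntryA (e : Int × String × String × String × String × String) : String :=
  (if e.1 > 1 then PySem.Int.toStr e.1 ++ "x" else "1x") ++ " | pid " ++ e.2.1 ++ " | etime "
    ++ e.2.2.1 ++ " | cpu " ++ e.2.2.2.1 ++ "% | mem " ++ e.2.2.2.2.1 ++ "% | " ++ e.2.2.2.2.2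

def summarize_process_lines (raw : String) : List String :=
  (((PySem.Str.splitlines raw).foldl pvStepA PySem.Dict.empty).values).map pvFmtEntryA

-- ===== PORT B =====
-- _parse: strip, skip blank, split(maxsplit=4), need 5 parts
def pvParse (line : String) : Option (String × String × String × String × String) :=
  let line := PySem.Str.strip line
  if line = "" then none
  else
    match PySem.Str.split₀Max line 4 with
    | [pid, etime, pcpu, pmem, args] => some (pid, etime, pcpu, pmem, args)
    | _ => none

def pvFmtB (n : Int) (pid etime pcpu pmem args : String) : String :=
  (if n > 1 then PySem.Int.toStr n ++ "x" else "1x") ++ " | pid " ++ pid ++ " | etime "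
    ++ etime ++ " | cpu " ++ pcpu ++ "% | mem " ++ pmem ++ "% | " ++ args

-- pass 1: count table keyed by args
def pvCountsB (lines : List String) : PySem.Dict String Int :=
  lines.foldl (fun c line =>
    match pvParse line with
    | none => c
    | some (_, _, _, _, args) => c.insert args (c.getD args 0 + 1)) PySem.Dict.empty

-- pass 2 step: emit at first appearance, with a seen-set
def pvEmitB (counts : PySem.Dict String Int) (st : List String × PySem.Set String)
    (line : String) : List String × PySem.Set String :=
  match pvParse line with
  | none => st
  | some (pid, etime, pcpu, pmem, args) =>
      if args ∈ st.2 then st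
      else (st.1 ++ [pvFmtB (counts.getD args 0) pid etime pcpu pmem args], st.2.add args)

def summarize_process_lines_alt (raw : String) : List String :=
  let lines := PySem.Str.splitlines raw
  (lines.foldl (pvEmitB (pvCountsB lines)) ([], PySem.Set.ofList [])).1

-- ===== PRECONDITION & SPEC =====
def Spec_summarize_process_lines (raw : String) (out : List String) : Prop := out = summarize_process_lines_alt raw
instance (raw : String) (out : List String) : Decidable (Spec_summarize_process_lines raw out) := by unfold Spec_summarize_process_lines; infer_instance

-- ===== CLAIM (what is proved, stated in full; the proofs are below) =====
def Claim_equal_summarize_process_lines : Prop := ∀ (raw : String), Dom_summarize_process_lines raw → Spec_summarize_process_lines raw (summarize_process_lines raw)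

-- ===== LEMMAS AND PROOFS =====

-- A's per-record dict update, at record level
def pvInsR (d : PySem.Dict String (Int × String × String × String × String × String))
    (r : String × String × String × String × String) :
    PySem.Dict String (Int × String × String × String × String × String) :=
  match d.get? r.2.2.2.2 with
  | some entry => d.insert r.2.2.2.2 (entry.1 + 1, entry.2)
  | none => d.insert r.2.2.2.2 (0 + 1, r.1, r.2.1, r.2.2.1, r.2.2.2.1, r.2.2.2.2)

lemma pvInsR_some {d : PySem.Dict String (Int × String × String × String × String × String)}
    {r : String × String × String × String × String}
    {e : Int × String × String × String × String × String} (h : d.get? r.2.2.2.2 = some e) :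
    pvInsR d r = d.insert r.2.2.2.2 (e.1 + 1, e.2) := by
  simp [pvInsR, h]

lemma pvInsR_none {d : PySem.Dict String (Int × String × String × String × String × String)}
    {r : String × String × String × String × String} (h : d.get? r.2.2.2.2 = none) :
    pvInsR d r = d.insert r.2.2.2.2 (0 + 1, r.1, r.2.1, r.2.2.1, r.2.2.2.1, r.2.2.2.2) := by
  simp [pvInsR, h]

-- first-appearance records, skipping keys already in the seen list
def pvFirsts (S : List String) : List (String × String × String × String × String) →
    List (String × String × String × String × String)
  | [] => []
  | r :: rest => if r.2.2.2.2 ∈ S then pvFirsts S rest else r :: pvFirsts (S ++ [r.2.2.2.2]) rest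

lemma pvStepA_eq (d : PySem.Dict String (Int × String × String × String × String × String))
    (line : String) :
    pvStepA d line = match pvParse line with
      | none => d
      | some r => pvInsR d r := by
  unfold pvStepA pvParse pvInsR
  by_cases h : PySem.Str.strip line = ""
  · simp [h]
  · simp only [h, if_false]
    rcases hs : PySem.Str.split₀Max (PySem.Str.strip line) 4 with
      _ | ⟨a, _ | ⟨b, _ | ⟨c, _ | ⟨e, _ | ⟨f, _ | ⟨g, rest⟩⟩⟩⟩⟩⟩ <;> rfl

-- fold over lines = fold over parsed records (generic in the per-record step)
lemma pvFoldl_parse {σ : Type} (f : σ → (String × String × String × String × String) → σ) :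
    ∀ (lines : List String) (s : σ),
      lines.foldl (fun s l => match pvParse l with | none => s | some r => f s r) s
        = (lines.filterMap pvParse).foldl f s := by
  intro lines
  induction lines with
  | nil => intro s; rfl
  | cons l rest ih =>
      intro s
      simp only [List.foldl_cons, List.filterMap_cons]
      cases h : pvParse l <;> simp [h, ih]

lemma pvFirsts_cons_mem {S : List String} {r : String × String × String × String × String}
    (rest : List (String × String × String × String × String)) (h : r.2.2.2.2 ∈ S) :
    pvFirsts S (r :: rest) = pvFirsts S rest := by
  simp [pvFirsts, h]

lemma pvFirsts_cons_not_mem {S : List String} {r : String × String × String × String × String}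
    (rest : List (String × String × String × String × String)) (h : r.2.2.2.2 ∉ S) :
    pvFirsts S (r :: rest) = r :: pvFirsts (S ++ [r.2.2.2.2]) rest := by
  simp [pvFirsts, h]

lemma pvFirsts_mem : ∀ (p : List (String × String × String × String × String)) (S : List String)
    (k : String),
    k ∈ (pvFirsts S p).map (fun x => x.2.2.2.2) ↔ k ∉ S ∧ k ∈ p.map (fun x => x.2.2.2.2) := by
  intro p
  induction p with
  | nil => intro S k; simp [pvFirsts]
  | cons r rest ih =>
      intro S k
      by_cases h : r.2.2.2.2 ∈ S
      · rw [pvFirsts_cons_mem rest h, ih]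
        simp only [List.map_cons, List.mem_cons]
        constructor
        · rintro ⟨h1, h2⟩; exact ⟨h1, Or.inr h2⟩
        · rintro ⟨h1, h2 | h2⟩
          · subst h2; exact absurd h h1
          · exact ⟨h1, h2⟩
      · rw [pvFirsts_cons_not_mem rest h]
        simp only [List.map_cons, List.mem_cons, ih, List.mem_append]
        constructor
        · rintro (rfl | ⟨h1, h2⟩)
          · exact ⟨h, Or.inl rfl⟩
          · exact ⟨fun hs => h1 (Or.inl hs), Or.inr h2⟩
        · rintro ⟨h1, rfl | h2⟩
          · exact Or.inl rfl
          · by_cases hk : k = r.2.2.2.2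
            · exact Or.inl hk
            · refine Or.inr ⟨fun hs => ?_, h2⟩
              rcases hs with hs | hs
              · exact h1 hs
              · exact hk (by simpa using hs)

lemma pvFirsts_nodup : ∀ (p : List (String × String × String × String × String)) (S : List String),
    ((pvFirsts S p).map (fun x => x.2.2.2.2)).Nodup ∧
      ∀ k ∈ (pvFirsts S p).map (fun x => x.2.2.2.2), k ∉ S := by
  intro p
  induction p with
  | nil => intro S; simp [pvFirsts]
  | cons r rest ih =>
      intro S
      by_cases h : r.2.2.2.2 ∈ S
      · rw [pvFirsts_cons_mem rest h]; exact ih S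
      · obtain ⟨hn, hs⟩ := ih (S ++ [r.2.2.2.2])
        rw [pvFirsts_cons_not_mem rest h]
        refine ⟨?_, ?_⟩
        · simp only [List.map_cons, List.nodup_cons]
          exact ⟨fun hm => (hs _ hm) (by simp), hn⟩
        · intro k hk
          simp only [List.map_cons, List.mem_cons] at hk
          rcases hk with rfl | hk
          · exact h
          · intro hkS; exact (hs _ hk) (by simp [hkS])

lemma pvFirsts_append : ∀ (p : List (String × String × String × String × String)) (S : List String)
    (r : String × String × String × String × String),
    pvFirsts S (p ++ [r]) =
      if r.2.2.2.2 ∈ S ∨ r.2.2.2.2 ∈ p.map (fun x => x.2.2.2.2) then pvFirsts S p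
      else pvFirsts S p ++ [r] := by
  intro p
  induction p with
  | nil =>
      intro S r
      simp only [List.nil_append, List.map_nil, List.not_mem_nil, or_false]
      by_cases h : r.2.2.2.2 ∈ S
      · rw [pvFirsts_cons_mem [] h, if_pos h]
      · rw [pvFirsts_cons_not_mem [] h, if_neg h]
        rfl
  | cons q rest ih =>
      intro S r
      by_cases h : q.2.2.2.2 ∈ S
      · rw [List.cons_append, pvFirsts_cons_mem (rest ++ [r]) h, ih,
          pvFirsts_cons_mem rest h]
        have hiff : (r.2.2.2.2 ∈ S ∨ r.2.2.2.2 ∈ rest.map (fun x => x.2.2.2.2))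
            ↔ (r.2.2.2.2 ∈ S ∨ r.2.2.2.2 ∈ (q :: rest).map (fun x => x.2.2.2.2)) := by
          simp only [List.map_cons, List.mem_cons]
          constructor
          · rintro (hs | hm)
            · exact Or.inl hs
            · exact Or.inr (Or.inr hm)
          · rintro (hs | he | hm)
            · exact Or.inl hs
            · exact Or.inl (by rw [he]; exact h)
            · exact Or.inr hm
        rw [if_congr hiff rfl rfl]
      · rw [List.cons_append, pvFirsts_cons_not_mem (rest ++ [r]) h, ih,
          pvFirsts_cons_not_mem rest h]
        have hiff : (r.2.2.2.2 ∈ S ++ [q.2.2.2.2] ∨ r.2.2.2.2 ∈ rest.map (fun x => x.2.2.2.2))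
            ↔ (r.2.2.2.2 ∈ S ∨ r.2.2.2.2 ∈ (q :: rest).map (fun x => x.2.2.2.2)) := by
          simp only [List.map_cons, List.mem_cons, List.mem_append, List.mem_singleton]
          tauto
        rw [if_congr hiff rfl rfl]
        by_cases hc : r.2.2.2.2 ∈ S ∨ r.2.2.2.2 ∈ (q :: rest).map (fun x => x.2.2.2.2)
        · rw [if_pos hc, if_pos hc]
        · rw [if_neg hc, if_neg hc, List.cons_append]

-- the entry A's dict holds for a first-appearance record, given the count source
def pvEntryOf (cnts : List String) (r : String × String × String × String × String) :
    String × (Int × String × String × String × String × String) :=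
  (r.2.2.2.2, ((List.count r.2.2.2.2 cnts : Int), r.1, r.2.1, r.2.2.1, r.2.2.2.1, r.2.2.2.2))

-- characterization of A's dict after folding all records
lemma pvA_items (recs : List (String × String × String × String × String)) :
    (recs.foldl pvInsR PySem.Dict.empty).items
      = (pvFirsts [] recs).map (pvEntryOf (recs.map (fun x => x.2.2.2.2))) := by
  induction recs using List.reverseRecOn with
  | nil => rfl
  | append_singleton p r ih =>
      have hkeys : (p.foldl pvInsR PySem.Dict.empty).keys
          = (pvFirsts [] p).map (fun x => x.2.2.2.2) := by
        unfold PySem.Dict.keys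
        rw [ih, List.map_map]
        exact List.map_congr_left (fun x _ => rfl)
      have hnodup : (p.foldl pvInsR PySem.Dict.empty).keys.Nodup := by
        rw [hkeys]; exact (pvFirsts_nodup p []).1
      rw [List.foldl_append, List.foldl_cons, List.foldl_nil, pvFirsts_append]
      simp only [List.not_mem_nil, false_or]
      by_cases hmem : r.2.2.2.2 ∈ p.map (fun x => x.2.2.2.2)
      · -- the key already exists: insert overwrites in place
        rw [if_pos hmem]
        have hmem2 : r.2.2.2.2 ∈ (pvFirsts [] p).map (fun x => x.2.2.2.2) := by
          rw [pvFirsts_mem]; exact ⟨by simp, hmem⟩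
        obtain ⟨x, hx, hxargs⟩ := List.mem_map.mp hmem2
        have hx_items : pvEntryOf (p.map (fun x => x.2.2.2.2)) x
            ∈ (p.foldl pvInsR PySem.Dict.empty).items := by
          rw [ih]; exact List.mem_map_of_mem hx
        have hget : (p.foldl pvInsR PySem.Dict.empty).get? r.2.2.2.2
            = some ((List.count r.2.2.2.2 (p.map (fun x => x.2.2.2.2)) : Int),
                x.1, x.2.1, x.2.2.1, x.2.2.2.1, x.2.2.2.2) := by
          have h1 := PySem.Dict.get?_of_mem_items _ hx_items hnodup
          simp only [pvEntryOf] at h1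
          rw [← hxargs]
          exact h1
        rw [pvInsR_some hget]
        unfold PySem.Dict.insert
        have hcont : (p.foldl pvInsR PySem.Dict.empty).contains r.2.2.2.2 = true := by
          rw [PySem.Dict.contains_eq_isSome_get?, hget]; rfl
        rw [if_pos hcont]
        show (((p.foldl pvInsR PySem.Dict.empty).items).map _) = _
        rw [ih, List.map_map]
        apply List.map_congr_left
        intro y hy
        simp only [Function.comp_apply, pvEntryOf]
        by_cases hyx : y.2.2.2.2 = r.2.2.2.2
        · have hxy : y = x := by
            have hnd := (pvFirsts_nodup p []).1
            have h1 : (fun x => x.2.2.2.2) y = (fun x => x.2.2.2.2) x := by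
              show y.2.2.2.2 = x.2.2.2.2
              rw [hyx, ← hxargs]
            exact List.inj_on_of_nodup_map hnd hy hx h1
          subst hxy
          simp only [show (y.2.2.2.2 == r.2.2.2.2) = true from beq_iff_eq.mpr hyx, if_true]
          have hcnt : List.count y.2.2.2.2 ((p ++ [r]).map (fun x => x.2.2.2.2))
              = List.count y.2.2.2.2 (p.map (fun x => x.2.2.2.2)) + 1 := by
            simp [List.count_append, List.count_singleton, hyx]
          rw [hcnt, hyx]
          push_cast
          ring_nf
        · simp only [show (y.2.2.2.2 == r.2.2.2.2) = false from beq_eq_false_iff_ne.mpr hyx,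
            Bool.false_eq_true, if_false]
          have hyx2 : ¬r.2.2.2.2 = y.2.2.2.2 := fun hh => hyx hh.symm
          have hcnt : List.count y.2.2.2.2 ((p ++ [r]).map (fun x => x.2.2.2.2))
              = List.count y.2.2.2.2 (p.map (fun x => x.2.2.2.2)) := by
            simp [List.count_append, hyx2]
          rw [hcnt]
      · -- new key: insert appends
        rw [if_neg hmem]
        have hget : (p.foldl pvInsR PySem.Dict.empty).get? r.2.2.2.2 = none := by
          rw [PySem.Dict.get?_eq_none_iff_not_mem_keys, hkeys]
          intro hc
          exact hmem ((pvFirsts_mem p [] r.2.2.2.2).mp hc).2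
        rw [pvInsR_none hget]
        unfold PySem.Dict.insert
        have hcont : (p.foldl pvInsR PySem.Dict.empty).contains r.2.2.2.2 = false := by
          rw [PySem.Dict.contains_eq_isSome_get?, hget]; rfl
        rw [if_neg (by simp [hcont])]
        show ((p.foldl pvInsR PySem.Dict.empty).items) ++ _ = _
        rw [List.map_append, ih]
        congr 1
        · apply List.map_congr_left
          intro y hy
          have hyx : y.2.2.2.2 ≠ r.2.2.2.2 := by
            intro he
            apply hmem
            have hmem3 := ((pvFirsts_mem p [] y.2.2.2.2).mp (List.mem_map_of_mem hy)).2
            rw [← he]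
            exact hmem3
          simp only [pvEntryOf]
          have hyx2 : ¬r.2.2.2.2 = y.2.2.2.2 := fun hh => hyx hh.symm
          have hcnt : List.count y.2.2.2.2 ((p ++ [r]).map (fun x => x.2.2.2.2))
              = List.count y.2.2.2.2 (p.map (fun x => x.2.2.2.2)) := by
            simp [List.count_append, hyx2]
          rw [hcnt]
        · simp only [List.map_cons, List.map_nil, pvEntryOf]
          have hcnt : List.count r.2.2.2.2 ((p ++ [r]).map (fun x => x.2.2.2.2)) = 1 := by
            have h0 : List.count r.2.2.2.2 (p.map (fun x => x.2.2.2.2)) = 0 := by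
              rw [List.count_eq_zero]
              exact hmem
            simp [List.count_append, h0]
          rw [hcnt]
          norm_num

-- A's fold over lines, moved to record level
lemma pvA_fold_lines : ∀ (lines : List String)
    (d : PySem.Dict String (Int × String × String × String × String × String)),
    lines.foldl pvStepA d
      = lines.foldl (fun s l => match pvParse l with | none => s | some r => pvInsR s r) d := by
  intro lines
  induction lines with
  | nil => intro d; rfl
  | cons l rest ih =>
      intro d
      simp only [List.foldl_cons, ih, pvStepA_eq]

-- B's count pass is the counter of the parsed keys
lemma pvCountsB_eq (lines : List String) :
    pvCountsB lines
      = PySem.Dict.counter ((lines.filterMap pvParse).map (fun x => x.2.2.2.2)) := by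
  unfold pvCountsB
  have h1 : (fun (c : PySem.Dict String Int) line =>
      match pvParse line with
      | none => c
      | some (_, _, _, _, args) => c.insert args (c.getD args 0 + 1))
      = (fun c l => match pvParse l with
        | none => c
        | some r => c.insert r.2.2.2.2 (c.getD r.2.2.2.2 0 + 1)) := by
    funext c l
    cases h : pvParse l with
    | none => rfl
    | some r => rcases r with ⟨a, b, cc, d, e⟩; rfl
  rw [h1, pvFoldl_parse, ← PySem.Dict.foldl_insert_getD_add_one_eq_counter, List.foldl_map]

-- B's second pass, characterized by pvFirsts
lemma pvB_emit (C : PySem.Dict String Int) :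
    ∀ (recs : List (String × String × String × String × String))
      (out : List String) (S : PySem.Set String),
      (recs.foldl (fun st r =>
          if r.2.2.2.2 ∈ st.2 then st
          else (st.1 ++ [pvFmtB (C.getD r.2.2.2.2 0) r.1 r.2.1 r.2.2.1 r.2.2.2.1 r.2.2.2.2],
                st.2.add r.2.2.2.2)) (out, S)).1
        = out ++ (pvFirsts S recs).map
            (fun r => pvFmtB (C.getD r.2.2.2.2 0) r.1 r.2.1 r.2.2.1 r.2.2.2.1 r.2.2.2.2) := by
  intro recs
  induction recs with
  | nil => intro out S; simp [pvFirsts]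
  | cons r rest ih =>
      intro out S
      simp only [List.foldl_cons]
      by_cases h : r.2.2.2.2 ∈ S
      · rw [if_pos (show r.2.2.2.2 ∈ (Prod.mk out S).2 from h), ih,
          pvFirsts_cons_mem rest h]
      · rw [if_neg (show r.2.2.2.2 ∉ (Prod.mk out S).2 from h)]
        have hadd : PySem.Set.add ((Prod.mk out S).2) r.2.2.2.2 = S ++ [r.2.2.2.2] :=
          PySem.Set.add_of_not_mem h
        rw [show ((Prod.mk out S).1
                ++ [pvFmtB (C.getD r.2.2.2.2 0) r.1 r.2.1 r.2.2.1 r.2.2.2.1 r.2.2.2.2],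
              PySem.Set.add ((Prod.mk out S).2) r.2.2.2.2)
            = (out ++ [pvFmtB (C.getD r.2.2.2.2 0) r.1 r.2.1 r.2.2.1 r.2.2.2.1 r.2.2.2.2],
              S ++ [r.2.2.2.2]) from by rw [hadd], ih,
          pvFirsts_cons_not_mem rest h]
        simp

-- ===== VERDICT (by name: the statement is the Claim_ definition above) =====
theorem summarize_process_lines_spec : Claim_equal_summarize_process_lines := by
  intro raw _
  unfold Spec_summarize_process_lines summarize_process_lines summarize_process_lines_alt
  show (((PySem.Str.splitlines raw).foldl pvStepA PySem.Dict.empty).values).map pvFmtEntryA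
      = ((PySem.Str.splitlines raw).foldl (pvEmitB (pvCountsB (PySem.Str.splitlines raw)))
          ([], PySem.Set.ofList [])).1
  rw [pvA_fold_lines, pvFoldl_parse]
  have hEmit : pvEmitB (pvCountsB (PySem.Str.splitlines raw))
      = (fun st l => match pvParse l with
        | none => st
        | some r =>
            if r.2.2.2.2 ∈ st.2 then st
            else (st.1 ++ [pvFmtB ((pvCountsB (PySem.Str.splitlines raw)).getD r.2.2.2.2 0)
                    r.1 r.2.1 r.2.2.1 r.2.2.2.1 r.2.2.2.2], st.2.add r.2.2.2.2)) := by
    funext st l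
    unfold pvEmitB
    cases h : pvParse l with
    | none => rfl
    | some r => rcases r with ⟨a, b, c, d, e⟩; rfl
  rw [hEmit, pvFoldl_parse, PySem.Set.ofList_nil,
    pvB_emit (pvCountsB (PySem.Str.splitlines raw)) _ [] [], pvCountsB_eq]
  unfold PySem.Dict.values
  rw [pvA_items, List.map_map, List.map_map, List.nil_append]
  apply List.map_congr_left
  intro r hr
  simp only [Function.comp_apply, pvEntryOf, pvFmtEntryA, pvFmtB, PySem.Dict.getD_counter]
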